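-- pv_equiv track=rewrite | github.com/PlasmaSheep/wtp-temp-unit-generator | generator/generator.py | get_unit_sizes
-- ===== SOURCE A (Python) =====
-- def get_unit_sizes(class_size, number_of_units):
--     """Given a class size, determine the best unit sizing.
--
--     Arguments:
--         class_size (int): Number of students in the class.
--     """
--
--     base_size = int(class_size / number_of_units)
--     remainder = class_size - base_size * number_of_units
--     unit_sizes = []
--
--     for i in range(0, number_of_units):
--         if i < remainder:
--             unit_sizes.append(base_size + 1)
--         else:
--             unit_sizes.append(base_size)
--
--     unit_sizes.sort()
--
--     return unit_sizes
-- ===== SOURCE B (Python) =====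
-- def get_unit_sizes(class_size, number_of_units):
--     """Greedy one-pass split: each unit takes the floor of what remains per unit
--     still to fill; sizes come out ascending, so no sort is needed."""
--     sizes = []
--     remaining = class_size
--     units_left = number_of_units
--     while units_left > 0:
--         size = remaining // units_left
--         sizes.append(size)
--         remaining -= size
--         units_left -= 1
--     return sizes
-- ===== Notes on version B (the rewrite author's own statement) =====
-- stated objective: alternative
-- what changed: replaces the index-vs-remainder loop followed by a sort with a single greedy pass that repeatedly gives the next unit floor(remaining/units_left), which emits the sizes already in ascending order with no sort
-- intended difference: for negative class_size with positive number_of_units (not evenly divisible), A's int(a/b) truncates toward zero so the returned unit sizes do not sum to class_size (e.g. A(-7,2)=[-3,-3] summing to -6), while B's floor-based greedy split returns [-4,-3] which sums to -7 as a partition must. — e.g. on get_unit_sizes(-7, 2): A returns [-3, -3], B returns [-4, -3]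
import Mathlib
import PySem

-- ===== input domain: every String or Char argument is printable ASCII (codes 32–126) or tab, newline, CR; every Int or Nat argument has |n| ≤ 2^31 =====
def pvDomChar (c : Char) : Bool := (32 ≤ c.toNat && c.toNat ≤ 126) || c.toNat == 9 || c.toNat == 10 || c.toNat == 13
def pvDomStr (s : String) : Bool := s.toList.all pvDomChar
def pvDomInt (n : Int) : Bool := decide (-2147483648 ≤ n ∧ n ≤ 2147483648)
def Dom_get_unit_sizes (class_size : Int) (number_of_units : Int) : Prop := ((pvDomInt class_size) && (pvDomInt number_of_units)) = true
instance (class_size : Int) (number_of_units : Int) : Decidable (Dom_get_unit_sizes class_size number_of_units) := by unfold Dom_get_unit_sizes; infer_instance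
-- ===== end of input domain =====

-- B replaces A's per-unit loop + sort with a single greedy pass that gives each unit
-- floor(remaining/units_left), emitting the sizes already ascending with no sort;
-- on negative class_size with positive number_of_units A's truncating int(a/b)
-- returns sizes that do not sum to class_size, B's floor-based greedy split does
-- (stated as D_ below).


-- ===== PORT A =====
-- int(class_size / number_of_units) is PySem.Int.truncdiv: exact for |args| ≤ 2^31 < 2^53
def get_unit_sizes (class_size : Int) (number_of_units : Int) : List Int :=
  let base_size := PySem.Int.truncdiv class_size number_of_units
  let remainder := class_size - base_size * number_of_units
  let unit_sizes : List Int :=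
    (PySem.List.pyRange 0 number_of_units 1).foldl
      (fun acc i => acc ++ [if i < remainder then base_size + 1 else base_size]) []
  PySem.List.sorted unit_sizes (fun x => x) false

-- ===== PORT B =====
-- the while loop, as fuel recursion on units_left: each iteration has units_left = k+1 > 0,
-- appends remaining // units_left and subtracts it; for number_of_units ≤ 0 the loop body
-- never runs (toNat = 0).
def altGo : Nat → Int → List Int
  | 0, _ => []
  | k+1, remaining =>
      let size := PySem.Int.floordiv remaining ((k : Int) + 1)
      size :: altGo k (remaining - size)

def get_unit_sizes_alt (class_size : Int) (number_of_units : Int) : List Int :=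
  altGo number_of_units.toNat class_size

-- ===== PRECONDITION & SPEC =====
-- Pre_ excludes only number_of_units = 0, where the Python A raises ZeroDivisionError.
def Pre_get_unit_sizes (class_size : Int) (number_of_units : Int) : Prop := number_of_units ≠ 0
instance (class_size : Int) (number_of_units : Int) : Decidable (Pre_get_unit_sizes class_size number_of_units) := by unfold Pre_get_unit_sizes; infer_instance
def pvWitness_get_unit_sizes : Int × Int := (10, 3)

-- For negative class_size with positive number_of_units not dividing it, A's truncating
-- int(a/b) returns units that do not sum to class_size (A(-7,2)=[-3,-3]); B returns the
-- floor-based partition [-4,-3], which sums to class_size as intended.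
def D_get_unit_sizes (class_size : Int) (number_of_units : Int) : Prop :=
  class_size < 0 ∧ 0 < number_of_units ∧ ¬ (number_of_units ∣ class_size)
instance (class_size : Int) (number_of_units : Int) : Decidable (D_get_unit_sizes class_size number_of_units) := by unfold D_get_unit_sizes; infer_instance

def Spec_get_unit_sizes (class_size : Int) (number_of_units : Int) (out : List Int) : Prop := ¬ D_get_unit_sizes class_size number_of_units → out = get_unit_sizes_alt class_size number_of_units
instance (class_size : Int) (number_of_units : Int) (out : List Int) : Decidable (Spec_get_unit_sizes class_size number_of_units out) := by unfold Spec_get_unit_sizes; infer_instance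

def pvDiffWitness_get_unit_sizes : Int × Int := (-7, 2)
def pvDiffWitnessOut_get_unit_sizes : (List Int) × (List Int) := ([-3, -3], [-4, -3])

-- ===== CLAIM (what is proved, stated in full; the proofs are below) =====
def Claim_unchanged_get_unit_sizes : Prop := ∀ (class_size : Int) (number_of_units : Int), Dom_get_unit_sizes class_size number_of_units → Pre_get_unit_sizes class_size number_of_units → Spec_get_unit_sizes class_size number_of_units (get_unit_sizes class_size number_of_units)
def Claim_changed_get_unit_sizes : Prop := Dom_get_unit_sizes (pvDiffWitness_get_unit_sizes.1) (pvDiffWitness_get_unit_sizes.2) ∧ Pre_get_unit_sizes (pvDiffWitness_get_unit_sizes.1) (pvDiffWitness_get_unit_sizes.2) ∧ D_get_unit_sizes (pvDiffWitness_get_unit_sizes.1) (pvDiffWitness_get_unit_sizes.2) ∧ get_unit_sizes (pvDiffWitness_get_unit_sizes.1) (pvDiffWitness_get_unit_sizes.2) = pvDiffWitnessOut_get_unit_sizes.1 ∧ get_unit_sizes_alt (pvDiffWitness_get_unit_sizes.1) (pvDiffWitness_get_unit_sizes.2) = pvDiffWitnessOut_get_unit_sizes.2 ∧ pvDiffWitnessOut_get_unit_sizes.1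 ≠ pvDiffWitnessOut_get_unit_sizes.2
def Claim_exact_get_unit_sizes : Prop := ∀ (class_size : Int) (number_of_units : Int), Dom_get_unit_sizes class_size number_of_units → Pre_get_unit_sizes class_size number_of_units → D_get_unit_sizes class_size number_of_units → get_unit_sizes class_size number_of_units ≠ get_unit_sizes_alt class_size number_of_units

-- ===== LEMMAS AND PROOFS =====

-- floor division and mod are determined by c = b*k + r, 0 ≤ r < k
lemma fdiv_mod_unique (c k b r : Int) (hk : 0 < k) (hr : 0 ≤ r) (hrk : r < k)
    (h : c = b * k + r) : PySem.Int.floordiv c k = b ∧ PySem.Int.mod c k = r := by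
  have h1 := PySem.Int.floordiv_mul_add_mod c k
  have h2 := PySem.Int.mod_nonneg c hk
  have h3 := PySem.Int.mod_lt c hk
  set q := PySem.Int.floordiv c k
  set m := PySem.Int.mod c k
  have hq : q = b := by nlinarith [sq_nonneg (q - b)]
  exact ⟨hq, by nlinarith⟩

-- the greedy peel produces exactly the two sorted constant blocks
lemma altGo_eq_blocks (k : Nat) (c : Int) (hk : 0 < k) :
    altGo k c
      = List.replicate ((k : Int) - PySem.Int.mod c k).toNat (PySem.Int.floordiv c k)
        ++ List.replicate (PySem.Int.mod c k).toNat (PySem.Int.floordiv c k + 1) := by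
  induction k generalizing c with
  | zero => omega
  | succ j ih =>
    have hkpos : (0 : Int) < (j : Int) + 1 := by positivity
    have hfm := PySem.Int.floordiv_mul_add_mod c ((j : Int) + 1)
    have hr0 := PySem.Int.mod_nonneg c hkpos
    have hrlt := PySem.Int.mod_lt c hkpos
    set b := PySem.Int.floordiv c ((j : Int) + 1) with hb
    set r := PySem.Int.mod c ((j : Int) + 1) with hrdef
    show b :: altGo j (c - b) = _
    have hcast : ((j + 1 : Nat) : Int) = (j : Int) + 1 := by push_cast; ring
    rw [hcast, ← hb, ← hrdef]
    rcases Nat.eq_zero_or_pos j with hj | hj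
    · subst hj
      have hr : r = 0 := by omega
      have hbc : b = c := by push_cast at hfm; omega
      simp [altGo, hr, hbc]
    · have hjpos : (0 : Int) < (j : Int) := by exact_mod_cast hj
      by_cases hcase : r < (j : Int)
      · -- c - b = b*j + r with 0 ≤ r < j
        obtain ⟨hq, hm⟩ := fdiv_mod_unique (c - b) j b r hjpos hr0 hcase (by linarith)
        rw [ih (c - b) hj, hq, hm]
        have h1 : ((j : Int) + 1 - r).toNat = ((j : Int) - r).toNat + 1 := by omega
        rw [h1, List.replicate_succ]
        simp
      · -- r = j : c - b = (b+1)*j + 0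
        have hrj : r = (j : Int) := by omega
        obtain ⟨hq, hm⟩ := fdiv_mod_unique (c - b) j (b + 1) 0 hjpos le_rfl hjpos
          (by rw [hrj] at hfm; nlinarith)
        rw [ih (c - b) hj, hq, hm]
        simp [hrj]

-- the if-map over range(0,n) splits into the two constant blocks
lemma map_ite_pyRange (b r n : Int) (hr0 : 0 ≤ r) (hrn : r ≤ n) :
    (PySem.List.pyRange 0 n 1).map (fun i => if i < r then b + 1 else b)
      = List.replicate r.toNat (b + 1) ++ List.replicate (n - r).toNat b := by
  rw [PySem.List.pyRange_one_append 0 r n hr0 hrn, List.map_append]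
  congr 1
  · rw [List.eq_replicate_iff]
    constructor
    · rw [List.length_map, PySem.List.length_pyRange_one]; omega
    · intro x hx
      rcases List.mem_map.1 hx with ⟨i, hi, rfl⟩
      rcases PySem.List.mem_pyRange_one.1 hi with ⟨_, h2⟩
      simp [h2]
  · rw [List.eq_replicate_iff]
    constructor
    · rw [List.length_map, PySem.List.length_pyRange_one]
    · intro x hx
      rcases List.mem_map.1 hx with ⟨i, hi, rfl⟩
      rcases PySem.List.mem_pyRange_one.1 hi with ⟨h1, _⟩
      simp [not_lt.2 h1]

-- sorting the two constant blocks swaps them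
lemma sorted_two_blocks (b : Int) (p q : Nat) :
    PySem.List.sorted (List.replicate p (b + 1) ++ List.replicate q b) (fun x => x) false
      = List.replicate q b ++ List.replicate p (b + 1) := by
  apply PySem.List.sorted_id_eq_of_perm_of_pairwise
  · exact List.perm_append_comm
  · rw [List.pairwise_append]
    refine ⟨?_, ?_, ?_⟩
    · exact List.pairwise_replicate.2 (Or.inr le_rfl)
    · exact List.pairwise_replicate.2 (Or.inr le_rfl)
    · intro x hx y hy
      rw [List.eq_of_mem_replicate hx, List.eq_of_mem_replicate hy]
      omega

lemma truncdiv_eq_floordiv (c n : Int) (hn : 0 < n) (h : 0 ≤ c ∨ n ∣ c) :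
    PySem.Int.truncdiv c n = PySem.Int.floordiv c n := by
  show c.tdiv n = c.fdiv n
  rw [Int.tdiv_eq_fdiv]
  rcases h with h | h
  · split_ifs <;> omega
  · rw [if_pos h]; omega

lemma rem_eq_mod (c n : Int) :
    c - PySem.Int.floordiv c n * n = PySem.Int.mod c n := by
  have h := PySem.Int.floordiv_mul_add_mod c n
  omega

-- ===== VERDICT (by name: the statement is the Claim_ definition above) =====
theorem get_unit_sizes_spec : Claim_unchanged_get_unit_sizes := by
  intro c n _ hpre
  unfold Spec_get_unit_sizes
  intro hnd
  unfold get_unit_sizes get_unit_sizes_alt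
  rcases lt_trichotomy n 0 with h | h | h
  · -- n < 0: both sides are []
    rw [PySem.List.pyRange_one_eq_nil h.le, Int.toNat_of_nonpos h.le]
    rfl
  · exact absurd h hpre
  · -- n > 0
    have hr0 := PySem.Int.mod_nonneg c h
    have hrlt := PySem.Int.mod_lt c h
    have hcase : 0 ≤ c ∨ n ∣ c := by
      unfold D_get_unit_sizes at hnd
      by_contra hcon
      push Not at hcon
      exact hnd ⟨by omega, h, hcon.2⟩
    have hnn : ((n.toNat : Int)) = n := Int.toNat_of_nonneg h.le
    rw [altGo_eq_blocks n.toNat c (by omega), hnn]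
    simp only [truncdiv_eq_floordiv c n h hcase, rem_eq_mod c n,
      PySem.List.foldl_append_singleton_eq_map, List.nil_append]
    rw [map_ite_pyRange _ _ _ hr0 hrlt.le, sorted_two_blocks]

theorem get_unit_sizes_changed : Claim_changed_get_unit_sizes := by
  unfold Claim_changed_get_unit_sizes; decide

theorem get_unit_sizes_tight : Claim_exact_get_unit_sizes := by
  intro c n _ _ hd
  obtain ⟨hc, hn, hdvd⟩ := hd
  have hr0 := PySem.Int.mod_nonneg c hn
  have hrlt := PySem.Int.mod_lt c hn
  have hrne : PySem.Int.mod c n ≠ 0 := fun h0 =>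
    hdvd ((PySem.Int.mod_eq_zero_iff_dvd c n).1 h0)
  -- A's truncating quotient is floordiv + 1 here, and its remainder is negative
  have htd : PySem.Int.truncdiv c n = PySem.Int.floordiv c n + 1 := by
    show c.tdiv n = c.fdiv n + 1
    rw [Int.tdiv_eq_fdiv, if_neg (fun hd => hrne ((PySem.Int.mod_eq_zero_iff_dvd c n).2 hd)),
      if_neg (by omega), if_pos hn.le, Int.sign_eq_one_of_pos hn]
  have hfm := PySem.Int.floordiv_mul_add_mod c n
  have hnn : ((n.toNat : Int)) = n := Int.toNat_of_nonneg hn.le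
  unfold get_unit_sizes get_unit_sizes_alt
  rw [altGo_eq_blocks n.toNat c (by omega), hnn]
  simp only [htd, PySem.List.foldl_append_singleton_eq_map, List.nil_append]
  have hremneg : c - (PySem.Int.floordiv c n + 1) * n < 0 := by nlinarith
  -- A's loop appends base_size every time
  have hmap : (PySem.List.pyRange 0 n 1).map
      (fun i => if i < c - (PySem.Int.floordiv c n + 1) * n then PySem.Int.floordiv c n + 1 + 1
                else PySem.Int.floordiv c n + 1)
      = List.replicate n.toNat (PySem.Int.floordiv c n + 1) := by
    rw [List.eq_replicate_iff]
    refine ⟨by rw [List.length_map, PySem.List.length_pyRange_one]; omega, ?_⟩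
    intro x hx
    rcases List.mem_map.1 hx with ⟨i, hi, rfl⟩
    rcases PySem.List.mem_pyRange_one.1 hi with ⟨h1, _⟩
    rw [if_neg (by omega)]
  rw [hmap, PySem.List.sorted_eq_self_of_pairwise _ _
    (List.pairwise_replicate.2 (Or.inr le_rfl))]
  intro heq
  have h0 := congrArg (fun l => l[0]?) heq
  simp only [List.getElem?_replicate, List.getElem?_append, List.length_replicate] at h0
  rw [if_pos (by omega), if_pos (by omega), if_pos (by omega)] at h0
  simp at h0
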